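-- pv_equiv track=rewrite | github.com/Lackadaisica1/pre-college-dump | apcspfinal/createproject.py | listcounts
-- ===== SOURCE A (Python) =====
-- def sort(alist):
--     swap = 0
--     for i in range(0, len(alist)):
--         for x in range(0, i):
--             if (alist[i] < alist[x]):
--                 swap = alist[i]
--                 alist[i] = alist[x]
--                 alist[x] = swap
--     return alist
--
-- def listcounts(alist):
--     listcounts = []
--     count = 1 # every item in a list appears at least once, lists should not be empty
--     listsort = sort(alist) # sort the list before the algorithm
--     for i in range(0, len(listsort)):
--         if ((i != (len(listsort)-1)) and (listsort[i] == listsort[i + 1])):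
--             count += 1
--         elif (i == (len(listsort) - 1)): # woo messing with bounds
--             listcounts.append(count)
--         else:
--             listcounts.append(count)
--             count = 1
--     return listcounts
-- ===== SOURCE B (Python) =====
-- def listcounts(alist):
--     s = sorted(alist)
--     counts = []
--     n = len(s)
--     i = 0
--     while i < n:
--         j = i + 1
--         while j < n and s[j] == s[i]:
--             j += 1
--         counts.append(j - i)
--         i = j
--     return counts
-- ===== Notes on version B (the rewrite author's own statement) =====
-- stated objective: faster
-- what changed: replaces the O(n^2) in-place swap sort plus index-lookahead counting with builtin sorted() followed by a single run-skipping pass that appends each run's length j-i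
import Mathlib
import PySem

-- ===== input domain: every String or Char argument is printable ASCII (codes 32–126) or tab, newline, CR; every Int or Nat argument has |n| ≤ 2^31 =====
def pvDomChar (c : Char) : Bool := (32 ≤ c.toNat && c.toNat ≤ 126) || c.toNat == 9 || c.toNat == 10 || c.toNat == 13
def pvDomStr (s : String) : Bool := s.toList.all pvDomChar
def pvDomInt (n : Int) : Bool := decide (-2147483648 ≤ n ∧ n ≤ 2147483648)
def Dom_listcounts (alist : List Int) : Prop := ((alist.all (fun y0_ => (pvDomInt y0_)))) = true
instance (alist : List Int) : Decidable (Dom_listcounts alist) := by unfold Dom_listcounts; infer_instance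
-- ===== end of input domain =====

-- B replaces A's quadratic in-place swap sort + index-lookahead counting by sorted() plus one
-- run-skipping pass (objective: faster). A sorts its argument list IN PLACE (the caller can
-- observe that mutation), B does not mutate — the equivalence proved here is about the return value.

-- ===== PORT A =====
-- helper 'sort' of A: for i in range(0,len): for x in range(0,i): swap if alist[i] < alist[x]
-- (indices produced by range are nonnegative and in range, so pyGetD/pySetD are exact here)
def pvSortA (alist : List Int) : List Int :=
  (PySem.List.pyRange 0 (PySem.List.len alist) 1).foldl
    (fun a i =>
      (PySem.List.pyRange 0 i 1).foldl
        (fun a x =>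
          if PySem.List.pyGetD a i 0 < PySem.List.pyGetD a x 0 then
            let swap := PySem.List.pyGetD a i 0
            let a := PySem.List.pySetD a i (PySem.List.pyGetD a x 0)
            PySem.List.pySetD a x swap
          else a)
        a)
    alist

def listcounts (alist : List Int) : List Int :=
  let listsort := pvSortA alist
  let n := PySem.List.len listsort
  ((PySem.List.pyRange 0 n 1).foldl
    (fun (st : List Int × Int) i =>
      if i ≠ n - 1 ∧ PySem.List.pyGetD listsort i 0 = PySem.List.pyGetD listsort (i + 1) 0 then
        (st.1, st.2 + 1)
      else if i = n - 1 then
        (st.1 ++ [st.2], st.2)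
      else
        (st.1 ++ [st.2], 1))
    ([], 1)).1

-- ===== PORT B =====
-- the inner 'while j < n and s[j] == s[i]: j += 1' of Source B: length of the leading run of
-- value v together with the remainder of the list (j - i = run length; i restarts at j)
def pvRunLen : Int → List Int → Nat × List Int
  | _, [] => (0, [])
  | v, x :: xs => if x = v then ((pvRunLen v xs).1 + 1, (pvRunLen v xs).2) else (0, x :: xs)

theorem pvRunLen_length_le (v : Int) (xs : List Int) : (pvRunLen v xs).2.length ≤ xs.length := by
  induction xs with
  | nil => simp [pvRunLen]
  | cons x xs ih =>
    by_cases h : x = v <;> simp [pvRunLen, h]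
    exact Nat.le_succ_of_le ih

-- the outer 'while i < n' of Source B: emit each run's length and restart after the run
def pvRuns : List Int → List Int
  | [] => []
  | x :: xs => (((pvRunLen x xs).1 : Int) + 1) :: pvRuns (pvRunLen x xs).2
termination_by s => s.length
decreasing_by exact Nat.lt_succ_of_le (pvRunLen_length_le x xs)

def listcounts_alt (alist : List Int) : List Int :=
  pvRuns (PySem.List.sorted alist (fun x => x) false)

-- ===== PRECONDITION & SPEC =====
def Spec_listcounts (alist : List Int) (out : List Int) : Prop := out = listcounts_alt alist
instance (alist : List Int) (out : List Int) : Decidable (Spec_listcounts alist out) := by unfold Spec_listcounts; infer_instance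

-- ===== CLAIM (what is proved, stated in full; the proofs are below) =====
def Claim_equal_listcounts : Prop := ∀ (alist : List Int), Dom_listcounts alist → Spec_listcounts alist (listcounts alist)

-- ===== LEMMAS AND PROOFS =====

-- one step of A's inner swap loop, in Nat-index form
def pvStep (i : Nat) (a : List Int) (x : Nat) : List Int :=
  if a.getD i 0 < a.getD x 0 then (a.set i (a.getD x 0)).set x (a.getD i 0) else a

-- getD of set, in the forms used below
theorem pvGetD_set_ne (a : List Int) (i j : Nat) (v : Int) (h : i ≠ j) :
    (a.set i v).getD j 0 = a.getD j 0 := by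
  simp [List.getD_eq_getElem?_getD, List.getElem?_set_ne h]

theorem pvGetD_set_self (a : List Int) (i : Nat) (v : Int) (h : i < a.length) :
    (a.set i v).getD i 0 = v := by
  simp [List.getD_eq_getElem?_getD, List.getElem?_set_self h]

theorem pvTake_succ_getD (a : List Int) (m : Nat) (h : m < a.length) :
    a.take (m + 1) = a.take m ++ [a.getD m 0] := by
  rw [List.take_add_one, List.getElem?_eq_getElem h]
  simp [List.getD_eq_getElem?_getD, List.getElem?_eq_getElem h]

-- sortedness of a prefix, index form
theorem pvSortedPrefix (a : List Int) (i : Nat) (hi : i ≤ a.length)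
    (hs : (a.take i).Pairwise (· ≤ ·)) :
    ∀ p q, p ≤ q → q < i → a.getD p 0 ≤ a.getD q 0 := by
  intro p q hpq hqi
  rcases Nat.eq_or_lt_of_le hpq with rfl | h
  · exact le_rfl
  have hql : q < a.length := Nat.lt_of_lt_of_le hqi hi
  have hpl : p < a.length := Nat.lt_of_lt_of_le (Nat.lt_of_lt_of_le h (Nat.le_of_lt hqi)) hi
  have := List.pairwise_iff_getElem.1 hs p q
    (by simp [List.length_take]; omega) (by simp [List.length_take]; omega) h
  simpa [List.getElem_take, List.getD_eq_getElem?_getD,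
    List.getElem?_eq_getElem hpl, List.getElem?_eq_getElem hql] using this

-- invariant of A's inner loop after processing x = 0 .. m-1: the first m prefix values plus
-- the current a[i] form, up to permutation, the original ones; the prefix is sorted and
-- bounded by the current a[i] and by every not-yet-visited prefix value
theorem pvInner_inv (a : List Int) (i : Nat) (hi : i < a.length)
    (hs : (a.take i).Pairwise (· ≤ ·)) :
    ∀ m, m ≤ i →
    (((List.range m).foldl (pvStep i) a).length = a.length ∧
     (∀ j, m ≤ j → j ≠ i → ((List.range m).foldl (pvStep i) a).getD j 0 = a.getD j 0) ∧
     ((((List.range m).foldl (pvStep i) a).take m ++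
        [((List.range m).foldl (pvStep i) a).getD i 0]).Perm (a.take m ++ [a.getD i 0])) ∧
     (((List.range m).foldl (pvStep i) a).take m).Pairwise (· ≤ ·) ∧
     (∀ y ∈ ((List.range m).foldl (pvStep i) a).take m,
        y ≤ ((List.range m).foldl (pvStep i) a).getD i 0) ∧
     (∀ y ∈ ((List.range m).foldl (pvStep i) a).take m,
        ∀ j, m ≤ j → j < i → y ≤ a.getD j 0)) := by
  intro m
  induction m with
  | zero => intro _; refine ⟨rfl, fun _ _ _ => rfl, List.Perm.refl _, by simp, by simp, by simp⟩
  | succ m ih =>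
    intro hm1
    have hm : m < i := hm1
    obtain ⟨hL, hU, hP, hS, hC, hA⟩ := ih (Nat.le_of_lt hm)
    set b := (List.range m).foldl (pvStep i) a with hb
    have hstep : (List.range (m + 1)).foldl (pvStep i) a = pvStep i b m := by
      rw [List.range_succ, List.foldl_append, List.foldl_cons, List.foldl_nil]
    rw [hstep]
    have hmi : m ≠ i := Nat.ne_of_lt hm
    have hmla : m < a.length := Nat.lt_trans hm hi
    have hmlb : m < b.length := by rw [hL]; exact hmla
    have hilb : i < b.length := by rw [hL]; exact hi
    have hw : b.getD m 0 = a.getD m 0 := hU m le_rfl hmi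
    have hsort := pvSortedPrefix a i (Nat.le_of_lt hi) hs
    by_cases hc : b.getD i 0 < b.getD m 0
    · -- swap case
      have hb' : pvStep i b m = (b.set i (b.getD m 0)).set m (b.getD i 0) := by
        rw [pvStep, if_pos hc]
      rw [hb']
      set c := b.getD i 0 with hcdef
      set w := b.getD m 0 with hwdef
      have hlen' : ((b.set i w).set m c).length = a.length := by simp [hL]
      have hval_i : ((b.set i w).set m c).getD i 0 = w := by
        rw [pvGetD_set_ne _ _ _ _ hmi, pvGetD_set_self _ _ _ hilb]
      have hval_m : ((b.set i w).set m c).getD m 0 = c :=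
        pvGetD_set_self _ _ _ (by simpa using hmlb)
      have hval_j : ∀ j, j ≠ m → j ≠ i → ((b.set i w).set m c).getD j 0 = b.getD j 0 := by
        intro j hjm hji
        rw [pvGetD_set_ne _ _ _ _ (fun h => hjm h.symm), pvGetD_set_ne _ _ _ _ (fun h => hji h.symm)]
      have htake : ((b.set i w).set m c).take m = b.take m := by
        rw [List.take_set_of_le le_rfl, List.take_set_of_le (Nat.le_of_lt hm)]
      have htake1 : ((b.set i w).set m c).take (m + 1) = b.take m ++ [c] := by
        rw [pvTake_succ_getD _ _ (by rw [hlen']; exact hmla), htake, hval_m]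
      have hatake1 : a.take (m + 1) = a.take m ++ [a.getD m 0] := pvTake_succ_getD _ _ hmla
      refine ⟨hlen', ?_, ?_, ?_, ?_, ?_⟩
      · intro j hj hji
        rw [hval_j j (by omega) hji]
        exact hU j (by omega) hji
      · rw [htake1, hval_i, hatake1, ← hw]
        refine List.Perm.trans (hP.append_right [w]) ?_
        simp only [List.append_assoc, List.singleton_append]
        exact List.Perm.append_left _ (List.Perm.swap _ _ _)
      · rw [htake1]
        rw [List.pairwise_append]
        exact ⟨hS, by simp, by intro y hy z hz; rw [List.mem_singleton] at hz; subst hz; exact hC y hy⟩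
      · intro y hy
        rw [htake1] at hy
        rw [hval_i]
        rcases List.mem_append.1 hy with hy | hy
        · exact le_of_lt (lt_of_le_of_lt (hC y hy) hc)
        · rw [List.mem_singleton] at hy; subst hy; exact le_of_lt hc
      · intro y hy j hj hji
        rw [htake1] at hy
        rcases List.mem_append.1 hy with hy | hy
        · exact hA y hy j (by omega) hji
        · rw [List.mem_singleton] at hy; subst hy
          calc c ≤ a.getD m 0 := by rw [← hw]; exact le_of_lt hc
            _ ≤ a.getD j 0 := hsort m j (by omega) hji
    · -- no-swap case
      have hb' : pvStep i b m = b := by rw [pvStep, if_neg hc]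
      rw [hb']
      rw [not_lt] at hc
      have htake1 : b.take (m + 1) = b.take m ++ [b.getD m 0] := pvTake_succ_getD _ _ hmlb
      have hatake1 : a.take (m + 1) = a.take m ++ [a.getD m 0] := pvTake_succ_getD _ _ hmla
      refine ⟨hL, ?_, ?_, ?_, ?_, ?_⟩
      · intro j hj hji; exact hU j (by omega) hji
      · rw [htake1, hatake1, hw]
        refine List.Perm.trans ?_ (List.Perm.trans ((hP.append_right [a.getD m 0]).symm.symm) ?_)
        · simp only [List.append_assoc, List.singleton_append]
          exact List.Perm.append_left _ (List.Perm.swap _ _ _)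
        · simp only [List.append_assoc, List.singleton_append]
          exact List.Perm.append_left _ (List.Perm.swap _ _ _)
      · rw [htake1, List.pairwise_append]
        refine ⟨hS, by simp, ?_⟩
        intro y hy z hz; rw [List.mem_singleton] at hz; subst hz
        rw [hw]
        exact hA y hy m le_rfl hm
      · intro y hy
        rw [htake1] at hy
        rcases List.mem_append.1 hy with hy | hy
        · exact hC y hy
        · rw [List.mem_singleton] at hy; subst hy; rw [hw]; rw [hw] at hc; exact hc
      · intro y hy j hj hji
        rw [htake1] at hy
        rcases List.mem_append.1 hy with hy | hy
        · exact hA y hy j (by omega) hji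
        · rw [List.mem_singleton] at hy; subst hy
          rw [hw]
          exact hsort m j (by omega) hji

-- A's inner loop keeps a permutation and sorts one more prefix element
theorem pvInner (a : List Int) (i : Nat) (hi : i < a.length)
    (hs : (a.take i).Pairwise (· ≤ ·)) :
    ((List.range i).foldl (pvStep i) a).Perm a ∧
    ((List.range i).foldl (pvStep i) a).length = a.length ∧
    (((List.range i).foldl (pvStep i) a).take (i + 1)).Pairwise (· ≤ ·) := by
  obtain ⟨hL, hU, hP, hS, hC, _⟩ := pvInner_inv a i hi hs i le_rfl
  set b := (List.range i).foldl (pvStep i) a with hb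
  have hilb : i < b.length := by rw [hL]; exact hi
  have htake1 : b.take (i + 1) = b.take i ++ [b.getD i 0] := pvTake_succ_getD _ _ hilb
  have hatake1 : a.take (i + 1) = a.take i ++ [a.getD i 0] := pvTake_succ_getD _ _ hi
  refine ⟨?_, hL, ?_⟩
  · -- whole-list permutation: identical tails past i + 1
    have hdrop : b.drop (i + 1) = a.drop (i + 1) := by
      apply List.ext_getElem?
      intro k
      by_cases hk : i + 1 + k < a.length
      · rw [List.getElem?_drop, List.getElem?_drop]
        have h1 : i + 1 + k < b.length := by rw [hL]; exact hk
        rw [List.getElem?_eq_getElem h1, List.getElem?_eq_getElem hk]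
        have := hU (i + 1 + k) (by omega) (by omega)
        simpa [List.getD_eq_getElem?_getD, List.getElem?_eq_getElem h1,
          List.getElem?_eq_getElem hk] using this
      · have h1 : a[i + 1 + k]? = none := List.getElem?_eq_none (by omega)
        have h2 : b[i + 1 + k]? = none := List.getElem?_eq_none (by omega)
        rw [List.getElem?_drop, List.getElem?_drop, h1, h2]
    have hbeq : b = (b.take i ++ [b.getD i 0]) ++ b.drop (i + 1) := by
      rw [← htake1, List.take_append_drop]
    have haeq : a = (a.take i ++ [a.getD i 0]) ++ a.drop (i + 1) := by
      rw [← hatake1, List.take_append_drop]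
    rw [hbeq, haeq, hdrop]
    exact (hP.append_right _)
  · rw [htake1, List.pairwise_append]
    exact ⟨hS, by simp, by intro y hy z hz; rw [List.mem_singleton] at hz; subst hz; exact hC y hy⟩

-- A's outer loop: after i rounds the first i elements are sorted, the list is a permutation
theorem pvOuter (l : List Int) (n : Nat) (hn : n ≤ l.length) :
    ((List.range n).foldl (fun a i => (List.range i).foldl (pvStep i) a) l).Perm l ∧
    ((List.range n).foldl (fun a i => (List.range i).foldl (pvStep i) a) l).length = l.length ∧
    (((List.range n).foldl (fun a i => (List.range i).foldl (pvStep i) a) l).take n).Pairwise (· ≤ ·) := by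
  induction n with
  | zero => exact ⟨List.Perm.refl _, rfl, by simp⟩
  | succ n ih =>
    obtain ⟨hP, hL, hS⟩ := ih (by omega)
    set b := (List.range n).foldl (fun a i => (List.range i).foldl (pvStep i) a) l with hb
    have hstep : (List.range (n + 1)).foldl (fun a i => (List.range i).foldl (pvStep i) a) l
        = (List.range n).foldl (pvStep n) b := by
      rw [List.range_succ, List.foldl_append, List.foldl_cons, List.foldl_nil]
    have hnb : n < b.length := by rw [hL]; omega
    obtain ⟨hP', hL', hS'⟩ := pvInner b n hnb hS
    rw [hstep]
    exact ⟨hP'.trans hP, by rw [hL', hL], hS'⟩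

theorem pvSortA_eq_natfold (alist : List Int) :
    pvSortA alist
      = (List.range alist.length).foldl (fun a i => (List.range i).foldl (pvStep i) a) alist := by
  unfold pvSortA pvStep
  simp only [PySem.List.len, PySem.List.pyRange_zero_nat, List.foldl_map,
    PySem.List.pyGetD_natCast, PySem.List.pySetD_natCast]

-- A's in-place sort is a sorted permutation, hence equals sorted(alist)
theorem pvSortA_eq_sorted (alist : List Int) :
    pvSortA alist = PySem.List.sorted alist (fun x => x) false := by
  rw [pvSortA_eq_natfold]
  obtain ⟨hP, hL, hS⟩ := pvOuter alist alist.length le_rfl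
  refine (PySem.List.sorted_id_eq_of_perm_of_pairwise _ _ hP ?_).symm
  rwa [List.take_of_length_le (by omega)] at hS

-- the lookahead scan over adjacent pairs equals the run-skipping pass, mid-run with count c
theorem pvZipFold (s : List Int) (x : Int) (c : Int) (acc : List Int) :
    (let r := ((x :: s).zip s).foldl
        (fun (st : List Int × Int) (p : Int × Int) =>
          if p.1 = p.2 then (st.1, st.2 + 1) else (st.1 ++ [st.2], 1))
        (acc, c)
     r.1 ++ [r.2]) = acc ++ (c + ((pvRunLen x s).1 : Int)) :: pvRuns (pvRunLen x s).2 := by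
  induction s generalizing x c acc with
  | nil => simp [pvRunLen, pvRuns]
  | cons y t ih =>
    simp only [List.zip_cons_cons, List.foldl_cons]
    by_cases h : x = y
    · subst h
      simp only [if_true]
      have h2 := ih x (c + 1) acc
      simp only at h2 ⊢
      rw [h2]
      have : c + 1 + ((pvRunLen x t).1 : Int) = c + (((pvRunLen x t).1 : Int) + 1) := by ring
      simp [pvRunLen, this]
    · rw [if_neg h]
      have h2 := ih y 1 (acc ++ [c])
      simp only at h2 ⊢
      rw [h2]
      have hyx : ¬ (y = x) := fun hh => h hh.symm
      simp [pvRunLen, hyx, pvRuns, add_comm]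

-- A's loop indices 0..len-2 read exactly the adjacent pairs
theorem pvPairs (x : Int) (s : List Int) :
    (PySem.List.pyRange 0 (s.length : Int) 1).map
      (fun i => (PySem.List.pyGetD (x :: s) i 0, PySem.List.pyGetD (x :: s) (i + 1) 0))
      = (x :: s).zip s := by
  apply List.ext_getElem
  · simp [PySem.List.length_pyRange_one]
  · intro k h1 h2
    simp only [List.getElem_map, PySem.List.getElem_pyRange_one, zero_add]
    have hk : k < s.length := by
      simpa [PySem.List.length_pyRange_one] using h1
    have e1 : PySem.List.pyGetD (x :: s) ((k : Int)) 0 = (x :: s).getD k 0 :=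
      PySem.List.pyGetD_natCast _ _ _
    have e2 : PySem.List.pyGetD (x :: s) ((k : Int) + 1) 0 = (x :: s).getD (k + 1) 0 := by
      have := PySem.List.pyGetD_natCast (x :: s) (k + 1) 0
      simpa [Nat.cast_add] using this
    rw [e1, e2, List.getElem_zip]
    have g1 : (x :: s).getD k 0 = (x :: s)[k]'(by simp; omega) := List.getD_eq_getElem _ _ _
    have g2 : (x :: s).getD (k + 1) 0 = s[k] := by
      rw [List.getD_eq_getElem _ _ (by simp; omega)]
      simp
    rw [g1, g2]

-- A's counting loop computes the run lengths of any list
theorem pvScan_eq_runs (s : List Int) :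
    ((PySem.List.pyRange 0 (PySem.List.len s) 1).foldl
      (fun (st : List Int × Int) i =>
        if i ≠ (PySem.List.len s) - 1 ∧
            PySem.List.pyGetD s i 0 = PySem.List.pyGetD s (i + 1) 0 then
          (st.1, st.2 + 1)
        else if i = (PySem.List.len s) - 1 then
          (st.1 ++ [st.2], st.2)
        else
          (st.1 ++ [st.2], 1))
      ([], 1)).1 = pvRuns s := by
  cases s with
  | nil => simp [pvRuns, PySem.List.len]
  | cons x t =>
    have hlen : PySem.List.len (x :: t) = (t.length : Int) + 1 := by
      simp [PySem.List.len]
    rw [hlen]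
    have hsplit : PySem.List.pyRange 0 ((t.length : Int) + 1) 1
        = PySem.List.pyRange 0 (t.length : Int) 1 ++ [(t.length : Int)] := by
      exact PySem.List.pyRange_one_succ_right (by positivity)
    rw [hsplit, List.foldl_append]
    -- last step: i = len - 1, append the count
    have hlast : ∀ (st : List Int × Int),
        (if (t.length : Int) ≠ ((t.length : Int) + 1) - 1 ∧
             PySem.List.pyGetD (x :: t) (t.length : Int) 0
               = PySem.List.pyGetD (x :: t) ((t.length : Int) + 1) 0 then
           (st.1, st.2 + 1)
         else if (t.length : Int) = ((t.length : Int) + 1) - 1 then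
           (st.1 ++ [st.2], st.2)
         else (st.1 ++ [st.2], 1)) = (st.1 ++ [st.2], st.2) := by
      intro st
      rw [if_neg (by simp), if_pos (by ring_nf)]
    rw [List.foldl_cons, List.foldl_nil, hlast]
    -- the prefix fold only sees i < len, so both index tests reduce to the pair comparison
    rw [PySem.List.foldl_congr_mem _ _
      (fun (st : List Int × Int) i =>
        if PySem.List.pyGetD (x :: t) i 0 = PySem.List.pyGetD (x :: t) (i + 1) 0 then
          (st.1, st.2 + 1)
        else (st.1 ++ [st.2], 1)) ([], 1)
      (by
        intro st i hi
        have hib := (PySem.List.mem_pyRange_one).1 hi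
        have hne : i ≠ ((t.length : Int) + 1) - 1 := by omega
        by_cases hp : PySem.List.pyGetD (x :: t) i 0 = PySem.List.pyGetD (x :: t) (i + 1) 0
        · rw [if_pos ⟨hne, hp⟩]; simp [hp]
        · rw [if_neg (by tauto), if_neg (by omega)]; simp [hp])]
    have hfold : List.foldl
        (fun (st : List Int × Int) i =>
          if PySem.List.pyGetD (x :: t) i 0 = PySem.List.pyGetD (x :: t) (i + 1) 0 then
            (st.1, st.2 + 1)
          else (st.1 ++ [st.2], 1)) ([], 1) (PySem.List.pyRange 0 (t.length : Int) 1)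
        = List.foldl
        (fun (st : List Int × Int) (p : Int × Int) =>
          if p.1 = p.2 then (st.1, st.2 + 1) else (st.1 ++ [st.2], 1))
        ([], 1) ((x :: t).zip t) := by
      rw [← pvPairs x t, List.foldl_map]
    rw [hfold]
    have hz := pvZipFold t x 1 []
    simp only at hz
    rw [hz]
    simp only [List.nil_append, pvRuns]
    congr 1
    omega

-- ===== VERDICT (by name: the statement is the Claim_ definition above) =====
theorem listcounts_spec : Claim_equal_listcounts := by
  intro alist _
  unfold Spec_listcounts listcounts listcounts_alt
  rw [pvSortA_eq_sorted]
  exact pvScan_eq_runs _
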